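-- pv_equiv track=rewrite | github.com/StevenXoFk/Tarea-taller-Tkinter | convertidor.py | base3_a_base16
-- ===== SOURCE A (Python) =====
-- def base3_a_base16(numero):
--     res = 0
--     exponentee = 0
--     base16 = ""
--
--
--     diles = "0123456789ABCDEF"
--
--     while numero > 0:
--         nuevo = numero % 10
--         res += nuevo * (3 ** exponentee)
--         numero //= 10
--         exponentee += 1
--
--     while res > 0:
--         todo = res % 16
--         base16 = diles[todo] + base16
--         res //= 16
--
--     return base16
-- ===== SOURCE B (Python) =====
-- DILES = "0123456789ABCDEF"
--
--
-- def _hex(n):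
--     if n <= 0:
--         return ""
--     return _hex(n // 16) + DILES[n % 16]
--
--
-- def base3_a_base16(numero):
--     if numero <= 0:
--         return ""
--     res = 0
--     for ch in str(numero):
--         res = res * 3 + int(ch)
--     return _hex(res)
-- ===== Notes on version B (the rewrite author's own statement) =====
-- stated objective: simpler
-- what changed: Phase 1's exponent-tracking power-sum over %10///10 is replaced by a Horner fold left-to-right over the characters of str(numero), and phase 2's prepend-while loop by a recursive helper that builds the hex string front-first; a leading guard handles non-positive numero, where the original's loops never run.
import Mathlib
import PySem

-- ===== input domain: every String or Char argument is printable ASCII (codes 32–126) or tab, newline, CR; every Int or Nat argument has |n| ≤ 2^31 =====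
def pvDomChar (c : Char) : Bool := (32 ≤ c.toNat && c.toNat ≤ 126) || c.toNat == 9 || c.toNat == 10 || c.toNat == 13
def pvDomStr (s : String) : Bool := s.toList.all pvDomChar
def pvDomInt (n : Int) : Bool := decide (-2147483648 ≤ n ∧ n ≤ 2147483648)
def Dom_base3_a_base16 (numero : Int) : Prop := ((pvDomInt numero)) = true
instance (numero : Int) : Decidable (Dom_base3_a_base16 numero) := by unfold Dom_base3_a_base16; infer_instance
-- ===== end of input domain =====

-- B replaces A's exponent-tracking digit power-sum by a Horner fold over str(numero) and
-- builds the hex string front-first by recursion instead of prepending in a while loop (objective: simpler).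

-- ===== PORT A =====
-- the shared digit table "0123456789ABCDEF" (same literal in both Pythons)
def pvDiles : List Char := ['0','1','2','3','4','5','6','7','8','9','A','B','C','D','E','F']

-- first while loop: res += (numero % 10) * 3 ** exponentee; numero //= 10; exponentee += 1
-- (exponentee only ever holds 0,1,2,…, so it is carried as a Nat exponent)
def pvLoopA1 (numero res : Int) (exponentee : Nat) : Int :=
  if h : 0 < numero then
    pvLoopA1 (PySem.Int.floordiv numero 10) (res + PySem.Int.mod numero 10 * 3 ^ exponentee) (exponentee + 1)
  else res
termination_by numero.toNat
decreasing_by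
  have h1 : PySem.Int.floordiv numero 10 < numero := by
    rw [PySem.Int.floordiv_lt_iff_lt_mul (by omega)]; omega
  have h2 : 0 ≤ PySem.Int.floordiv numero 10 := by
    rw [PySem.Int.le_floordiv_iff_mul_le (by omega)]; omega
  omega

-- second while loop: base16 = diles[res % 16] + base16; res //= 16  (string kept as List Char;
-- the index res % 16 is always in range, so the pyGetD default is never read)
def pvLoopA2 (res : Int) (base16 : List Char) : List Char :=
  if h : 0 < res then
    pvLoopA2 (PySem.Int.floordiv res 16) (PySem.List.pyGetD pvDiles (PySem.Int.mod res 16) '?' :: base16)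
  else base16
termination_by res.toNat
decreasing_by
  have h1 : PySem.Int.floordiv res 16 < res := by
    rw [PySem.Int.floordiv_lt_iff_lt_mul (by omega)]; omega
  have h2 : 0 ≤ PySem.Int.floordiv res 16 := by
    rw [PySem.Int.le_floordiv_iff_mul_le (by omega)]; omega
  omega

def base3_a_base16 (numero : Int) : String :=
  String.ofList (pvLoopA2 (pvLoopA1 numero 0 0) [])

-- ===== PORT B =====
-- _hex(n): "" if n <= 0 else _hex(n // 16) + DILES[n % 16]
def pvHexB (n : Int) : List Char :=
  if h : n ≤ 0 then []
  else pvHexB (PySem.Int.floordiv n 16) ++ [PySem.List.pyGetD pvDiles (PySem.Int.mod n 16) '?']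
termination_by n.toNat
decreasing_by
  have h1 : PySem.Int.floordiv n 16 < n := by
    rw [PySem.Int.floordiv_lt_iff_lt_mul (by omega)]; omega
  have h2 : 0 ≤ PySem.Int.floordiv n 16 := by
    rw [PySem.Int.le_floordiv_iff_mul_le (by omega)]; omega
  omega

-- for ch in str(numero): res = res * 3 + int(ch)
-- int(ch) is ported as the code-point arithmetic (c.toNat - 48), exact on the decimal digit
-- characters str produces for the positive numero this is called on
def pvHornerB (numero : Int) : Int :=
  (PySem.Int.toChars numero).foldl (fun res c => res * 3 + ((c.toNat : Int) - 48)) 0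

def base3_a_base16_alt (numero : Int) : String :=
  if numero ≤ 0 then "" else String.ofList (pvHexB (pvHornerB numero))

-- ===== PRECONDITION & SPEC =====
def Spec_base3_a_base16 (numero : Int) (out : String) : Prop := out = base3_a_base16_alt numero
instance (numero : Int) (out : String) : Decidable (Spec_base3_a_base16 numero out) := by unfold Spec_base3_a_base16; infer_instance

-- ===== CLAIM (what is proved, stated in full; the proofs are below) =====
def Claim_equal_base3_a_base16 : Prop := ∀ (numero : Int), Dom_base3_a_base16 numero → Spec_base3_a_base16 numero (base3_a_base16 numero)

-- ===== LEMMAS AND PROOFS =====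

-- value of the decimal digit string of n read as base-3 digits (what both phase-1 loops compute)
def pvR3 : Nat → Int
  | 0 => 0
  | n + 1 => ((n + 1) % 10 : Nat) + 3 * pvR3 ((n + 1) / 10)

theorem pvR3_step (n : Nat) (h : 0 < n) : pvR3 n = ((n % 10 : Nat) : Int) + 3 * pvR3 (n / 10) := by
  obtain ⟨m, rfl⟩ := Nat.exists_eq_succ_of_ne_zero (Nat.pos_iff_ne_zero.mp h)
  rw [pvR3]

-- A's first loop computes res + r3(numero) * 3^exponentee
theorem pvLoopA1_eq (n : Nat) : ∀ (res : Int) (e : Nat),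
    pvLoopA1 (n : Int) res e = res + pvR3 n * 3 ^ e := by
  induction n using Nat.strong_induction_on with
  | _ n ih =>
    intro res e
    rw [pvLoopA1]
    by_cases hn : 0 < n
    · rw [dif_pos (by exact_mod_cast hn)]
      rw [show PySem.Int.floordiv (n : Int) 10 = ((n / 10 : Nat) : Int) from by
        exact_mod_cast PySem.Int.floordiv_natCast n 10]
      rw [show PySem.Int.mod (n : Int) 10 = ((n % 10 : Nat) : Int) from by
        exact_mod_cast PySem.Int.mod_natCast n 10]
      rw [ih (n / 10) (Nat.div_lt_self hn (by omega))]
      rw [pvR3_step n hn]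
      ring
    · have h0 : n = 0 := by omega
      subst h0
      rw [dif_neg (by omega)]
      simp [pvR3]

-- fuel irrelevance for Nat.toDigitsCore (enough fuel on both sides)
theorem pvTDC_fuel (f₁ : Nat) : ∀ (f₂ n : Nat) (l : List Char), n < f₁ → n < f₂ →
    Nat.toDigitsCore 10 f₁ n l = Nat.toDigitsCore 10 f₂ n l := by
  induction f₁ with
  | zero => intro f₂ n l h1 _; omega
  | succ f ih =>
    intro f₂ n l h1 h2
    cases f₂ with
    | zero => omega
    | succ f' =>
      simp only [Nat.toDigitsCore]
      by_cases hd : n / 10 = 0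
      · simp [hd]
      · simp only [hd, if_false]
        exact ih f' (n / 10) _ (by have := Nat.div_lt_self (by omega : 0 < n) (by omega : 1 < 10); omega)
          (by have := Nat.div_lt_self (by omega : 0 < n) (by omega : 1 < 10); omega)

-- toDigitsCore appends to its accumulator
theorem pvTDC_append (f : Nat) : ∀ (n : Nat) (l : List Char),
    Nat.toDigitsCore 10 f n l = Nat.toDigitsCore 10 f n [] ++ l := by
  induction f with
  | zero => intro n l; simp [Nat.toDigitsCore]
  | succ f ih =>
    intro n l
    simp only [Nat.toDigitsCore]
    by_cases hd : n / 10 = 0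
    · simp [hd]
    · simp only [hd, if_false]
      rw [ih (n / 10) (Nat.digitChar (n % 10) :: l), ih (n / 10) [Nat.digitChar (n % 10)]]
      simp

theorem pvToDigits_lt (n : Nat) (h : n < 10) : Nat.toDigits 10 n = [Nat.digitChar n] := by
  simp [Nat.toDigits, Nat.toDigitsCore, Nat.div_eq_of_lt h, Nat.mod_eq_of_lt h]

theorem pvToDigits_ge (n : Nat) (h : 10 ≤ n) :
    Nat.toDigits 10 n = Nat.toDigits 10 (n / 10) ++ [Nat.digitChar (n % 10)] := by
  have hd : n / 10 ≠ 0 := by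
    have := Nat.div_le_div_right (c := 10) h; omega
  rw [Nat.toDigits, Nat.toDigitsCore]
  simp only [hd, if_false]
  rw [pvTDC_append n (n / 10) [Nat.digitChar (n % 10)]]
  rw [pvTDC_fuel n (n / 10 + 1) (n / 10) []
    (Nat.div_lt_self (by omega) (by omega)) (by omega)]
  rfl

theorem pvDigitChar_toNat (d : Nat) (h : d < 10) : ((Nat.digitChar d).toNat : Int) - 48 = d := by
  interval_cases d <;> decide

-- Horner over the decimal digit characters of n computes a * 3^(#digits) + r3(n)
theorem pvHorner_eq (n : Nat) : ∀ (a : Int),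
    (Nat.toDigits 10 n).foldl (fun res c => res * 3 + ((c.toNat : Int) - 48)) a
      = a * 3 ^ (Nat.toDigits 10 n).length + pvR3 n := by
  induction n using Nat.strong_induction_on with
  | _ n ih =>
    intro a
    by_cases h : n < 10
    · rw [pvToDigits_lt n h]
      simp only [List.foldl_cons, List.foldl_nil, List.length_cons, List.length_nil]
      rw [pvDigitChar_toNat n h]
      cases n with
      | zero => simp [pvR3]
      | succ m =>
        rw [pvR3_step (m + 1) (by omega)]
        rw [Nat.mod_eq_of_lt h, Nat.div_eq_of_lt h]
        simp [pvR3]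
    · replace h : 10 ≤ n := by omega
      rw [pvToDigits_ge n h]
      rw [List.foldl_append]
      rw [ih (n / 10) (Nat.div_lt_self (by omega) (by omega)) a]
      simp only [List.foldl_cons, List.foldl_nil, List.length_append, List.length_cons,
        List.length_nil]
      rw [pvDigitChar_toNat (n % 10) (Nat.mod_lt n (by omega))]
      rw [pvR3_step n (by omega)]
      ring

-- A's second loop is B's recursive hex builder with the accumulator appended
theorem pvLoopA2_eq (k : Nat) : ∀ (r : Int), r.toNat = k → ∀ (acc : List Char),
    pvLoopA2 r acc = pvHexB r ++ acc := by
  induction k using Nat.strong_induction_on with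
  | _ k ih =>
    intro r hk acc
    rw [pvLoopA2, pvHexB]
    by_cases hr : 0 < r
    · have h1 : PySem.Int.floordiv r 16 < r := by
        rw [PySem.Int.floordiv_lt_iff_lt_mul (by omega)]; omega
      have h2 : 0 ≤ PySem.Int.floordiv r 16 := by
        rw [PySem.Int.le_floordiv_iff_mul_le (by omega)]; omega
      rw [dif_pos hr, dif_neg (by omega)]
      rw [ih (PySem.Int.floordiv r 16).toNat (by omega) _ rfl]
      simp
    · rw [dif_neg hr, dif_pos (by omega)]
      simp

theorem pvHornerB_eq (numero : Int) (h : 0 < numero) :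
    pvHornerB numero = pvR3 numero.toNat := by
  unfold pvHornerB
  have hnn : ¬ numero < 0 := by omega
  rw [show PySem.Int.toChars numero = Nat.toDigits 10 numero.toNat by
    simp [PySem.Int.toChars, hnn]]
  rw [pvHorner_eq numero.toNat 0]
  ring

-- ===== VERDICT (by name: the statement is the Claim_ definition above) =====
theorem base3_a_base16_spec : Claim_equal_base3_a_base16 := by
  intro numero _
  unfold Spec_base3_a_base16 base3_a_base16 base3_a_base16_alt
  by_cases h : numero ≤ 0
  · rw [if_pos h]
    rw [pvLoopA1, dif_neg (by omega)]
    rw [pvLoopA2, dif_neg (by omega)]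
  · rw [if_neg h]
    replace h : 0 < numero := by omega
    have h1 : pvLoopA1 numero 0 0 = pvR3 numero.toNat := by
      have := pvLoopA1_eq numero.toNat 0 0
      rw [Int.toNat_of_nonneg (by omega)] at this
      simpa using this
    rw [h1, ← pvHornerB_eq numero h]
    rw [pvLoopA2_eq (pvHornerB numero).toNat _ rfl []]
    simp
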